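-- pv_equiv track=rewrite | github.com/songc/LeetCode-Pyhton | leetcode1408.py | stringMatching
-- ===== SOURCE A (Python) =====
-- from typing import List
--
-- def stringMatching(words: List[str]) -> List[str]:
--     words.sort(key=lambda x:len(x))
--     ans = []
--     for i in range(len(words)):
--         for j in range(i,len(words)):
--             if len(words[i])==len(words[j]):
--                 continue
--             if words[j].find(words[i])>-1:
--                 ans.append(words[i])
--                 break
--     return ans
-- ===== SOURCE B (Python) =====
-- from typing import List
--
-- def stringMatching(words: List[str]) -> List[str]:
--     # Collect every PROPER substring (length < len(v)) of every word into one set,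
--     # then emit, in length-sorted (stable) order, the words found in that set.
--     subs = set()
--     for v in words:
--         n = len(v)
--         for L in range(n):
--             for s in range(n - L + 1):
--                 subs.add(v[s:s + L])
--     return [w for w in sorted(words, key=len) if w in subs]
-- ===== Notes on version B (the rewrite author's own statement) =====
-- stated objective: faster
-- what changed: Instead of scanning, for each word of the length-sorted list, all later words for a strictly longer superstring, B builds once a set of every proper substring of every word and emits the length-sorted words found in that set by a single membership filter.
import Mathlib
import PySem

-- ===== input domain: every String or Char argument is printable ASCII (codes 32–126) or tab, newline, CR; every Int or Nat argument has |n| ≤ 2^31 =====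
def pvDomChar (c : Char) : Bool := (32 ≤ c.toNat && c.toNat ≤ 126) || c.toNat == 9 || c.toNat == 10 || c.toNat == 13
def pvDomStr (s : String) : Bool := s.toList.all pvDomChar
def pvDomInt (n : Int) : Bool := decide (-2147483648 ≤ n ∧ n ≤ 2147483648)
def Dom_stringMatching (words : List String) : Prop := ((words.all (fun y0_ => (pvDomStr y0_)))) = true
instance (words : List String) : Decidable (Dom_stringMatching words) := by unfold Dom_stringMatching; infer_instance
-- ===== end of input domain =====

-- B replaces A's pairwise scan over the length-sorted list by one set of all proper
-- substrings plus a single membership filter (objective: faster).  Python A sorts its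
-- argument IN PLACE (B does not); the equivalence proved here is about the RETURN value.

-- ===== PORT A =====
-- inner loop 'for j in range(i, n)': continue on equal length, append + break on find > -1
def aScan (wi : String) : List String → Bool
  | [] => false
  | wj :: rest =>
    if PySem.Str.len wi = PySem.Str.len wj then aScan wi rest
    else if PySem.Str.find wj wi > -1 then true
    else aScan wi rest

-- outer loop 'for i in range(len(words))', appending words[i] when the inner loop broke
def aOuter : List String → List String
  | [] => []
  | wi :: rest => if aScan wi (wi :: rest) then wi :: aOuter rest else aOuter rest

def stringMatching (words : List String) : List String :=
  aOuter (PySem.List.sorted words (fun x => PySem.Str.len x) false)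

-- ===== PORT B =====
-- Source B's two inner loops: add every slice v[s:s+L] with L < len(v) to the set
def properSubsInto (subs : PySem.Set String) (v : String) : PySem.Set String :=
  let n := PySem.Str.len v
  (PySem.List.pyRange 0 n 1).foldl (fun acc L =>
    (PySem.List.pyRange 0 (n - L + 1) 1).foldl (fun acc2 s =>
      PySem.Set.add acc2 (PySem.Str.slice v (some s) (some (s + L)))) acc) subs

def stringMatching_alt (words : List String) : List String :=
  let subs := words.foldl properSubsInto PySem.Set.empty
  (PySem.List.sorted words (fun x => PySem.Str.len x) false).filter
    (fun w => PySem.Set.contains subs w)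

-- ===== PRECONDITION & SPEC =====
def Spec_stringMatching (words : List String) (out : List String) : Prop := out = stringMatching_alt words
instance (words : List String) (out : List String) : Decidable (Spec_stringMatching words out) := by unfold Spec_stringMatching; infer_instance

-- ===== CLAIM (what is proved, stated in full; the proofs are below) =====
def Claim_equal_stringMatching : Prop := ∀ (words : List String), Dom_stringMatching words → Spec_stringMatching words (stringMatching words)

-- ===== LEMMAS AND PROOFS =====

-- "w is a proper substring of v"
def ProperSub (w v : String) : Prop :=
  w.toList <:+: v.toList ∧ w.toList.length < v.toList.length

-- A's inner scan succeeds exactly on the strictly-longer supersetting words of the suffix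
lemma aScan_iff (wi : String) (s : List String) :
    aScan wi s = true ↔ ∃ v ∈ s, ProperSub wi v := by
  induction s with
  | nil => simp [aScan]
  | cons wj rest ih =>
    simp only [aScan]
    by_cases hlen : PySem.Str.len wi = PySem.Str.len wj
    · simp only [if_pos hlen, ih]
      constructor
      · rintro ⟨v, hv, hp⟩; exact ⟨v, List.mem_cons_of_mem _ hv, hp⟩
      · rintro ⟨v, hv, hp⟩
        rcases List.mem_cons.mp hv with rfl | hv
        · exfalso
          have h1 : (wi.toList.length : Int) = (v.toList.length : Int) := by
            simpa [PySem.Str.len_eq] using hlen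
          have h2 := hp.2
          omega
        · exact ⟨v, hv, hp⟩
    · by_cases hf : PySem.Str.find wj wi > -1
      · simp only [if_neg hlen, if_pos hf]
        have hinf : wi.toList <:+: wj.toList :=
          (PySem.Str.find_nonneg_iff wj wi).mp (by omega)
        have hle := hinf.length_le
        have hne : (wi.toList.length : Int) ≠ (wj.toList.length : Int) := by
          simpa [PySem.Str.len_eq] using hlen
        exact iff_of_true trivial ⟨wj, List.mem_cons_self, hinf, by omega⟩
      · simp only [if_neg hlen, if_neg hf, ih]
        have hninf : ¬ wi.toList <:+: wj.toList := fun h => by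
          have := (PySem.Str.find_nonneg_iff wj wi).mpr h; omega
        constructor
        · rintro ⟨v, hv, hp⟩; exact ⟨v, List.mem_cons_of_mem _ hv, hp⟩
        · rintro ⟨v, hv, hp⟩
          rcases List.mem_cons.mp hv with rfl | hv
          · exact absurd hp.1 hninf
          · exact ⟨v, hv, hp⟩

-- generic membership through a foldl whose step adds conditionally-described elements
lemma mem_foldl_step (w : String) (l : List Int)
    (g : PySem.Set String → Int → PySem.Set String) (P : Int → Prop)
    (h : ∀ acc i, w ∈ g acc i ↔ w ∈ acc ∨ P i) :
    ∀ acc, w ∈ l.foldl g acc ↔ w ∈ acc ∨ ∃ i ∈ l, P i := by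
  induction l with
  | nil => simp
  | cons x xs ih =>
    intro acc
    simp only [List.foldl_cons, ih, h, List.mem_cons]
    constructor
    · rintro ((hm | hp) | ⟨i, hi, hpi⟩)
      · exact Or.inl hm
      · exact Or.inr ⟨x, Or.inl rfl, hp⟩
      · exact Or.inr ⟨i, Or.inr hi, hpi⟩
    · rintro (hm | ⟨i, (rfl | hi), hpi⟩)
      · exact Or.inl (Or.inl hm)
      · exact Or.inl (Or.inr hpi)
      · exact Or.inr ⟨i, hi, hpi⟩

-- "w is the slice v[s:s+L]"
def SliceAt (w v : String) (L s : Int) : Prop :=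
  w = PySem.Str.slice v (some s) (some (s + L))

-- a generated slice is a proper substring
lemma slice_proper (v : String) (L s : Int)
    (hL : 0 ≤ L) (hLn : L < PySem.Str.len v) (hs : 0 ≤ s) :
    ProperSub (PySem.Str.slice v (some s) (some (s + L))) v := by
  have hlen : PySem.Str.len v = (v.toList.length : Int) := PySem.Str.len_eq v
  have htl : (PySem.Str.slice v (some s) (some (s + L))).toList
      = (v.toList.drop s.toNat).take L.toNat := by
    rw [PySem.Str.toList_slice, PySem.Chars.slice_eq_listSlice,
      PySem.List.slice_toNat _ hs (by omega)]
    congr 1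
    omega
  have hdlen : (v.toList.drop s.toNat).length = v.toList.length - s.toNat :=
    List.length_drop
  constructor
  · rw [htl]
    have hpre : (v.toList.drop s.toNat).take L.toNat <+: v.toList.drop s.toNat :=
      List.take_prefix _ _
    exact ((PySem.Chars.isIn_iff_infix _ _).mp
      ((PySem.Chars.exists_prefix_drop_iff_isIn _ _).mp ⟨s.toNat, hpre⟩))
  · rw [htl, List.length_take, hdlen]
    omega

-- every proper substring is generated by some (L, s) of Source B's ranges
lemma proper_slice (w v : String) (h : ProperSub w v) :
    ∃ L ∈ PySem.List.pyRange 0 (PySem.Str.len v) 1,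
      ∃ s ∈ PySem.List.pyRange 0 (PySem.Str.len v - L + 1) 1, SliceAt w v L s := by
  obtain ⟨hinf, hlt⟩ := h
  have hlen : PySem.Str.len v = (v.toList.length : Int) := PySem.Str.len_eq v
  obtain ⟨j, hpre⟩ := (PySem.Chars.exists_prefix_drop_iff_isIn w.toList v.toList).mpr
    ((PySem.Chars.isIn_iff_infix _ _).mpr hinf)
  have hpre' : w.toList <+: v.toList.drop (min j v.toList.length) := by
    by_cases hj : j ≤ v.toList.length
    · rw [min_eq_left hj]; exact hpre
    · have : v.toList.drop j = [] := List.drop_eq_nil_of_le (by omega)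
      have hw : w.toList = [] := List.prefix_nil.mp (this ▸ hpre)
      simp [hw]
  set a := min j v.toList.length with ha
  have haw : a + w.toList.length ≤ v.toList.length := by
    have hl2 := hpre'.length_le
    rw [List.length_drop] at hl2
    have hale : a ≤ v.toList.length := by omega
    omega
  refine ⟨(w.toList.length : Int), ?_, (a : Int), ?_, ?_⟩
  · rw [PySem.List.mem_pyRange_one]; omega
  · rw [PySem.List.mem_pyRange_one]; omega
  · unfold SliceAt
    apply String.toList_inj.mp
    rw [PySem.Str.toList_slice, PySem.Chars.slice_eq_listSlice]
    rw [show ((a : Int) + (w.toList.length : Int)) = ((a + w.toList.length : Nat) : Int) by push_cast; ring]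
    rw [PySem.List.slice_natCast]
    have : a + w.toList.length - a = w.toList.length := by omega
    rw [this]
    exact List.prefix_iff_eq_take.mp hpre'

-- the set Source B builds for one word holds exactly its proper substrings
lemma mem_properSubsInto (w v : String) (acc : PySem.Set String) :
    w ∈ properSubsInto acc v ↔ w ∈ acc ∨ ProperSub w v := by
  unfold properSubsInto
  rw [mem_foldl_step w _ _
    (fun L => ∃ s ∈ PySem.List.pyRange 0 (PySem.Str.len v - L + 1) 1, SliceAt w v L s)
    (fun acc L => mem_foldl_step w _ _ (fun s => SliceAt w v L s)
      (fun acc2 s => by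
        rw [PySem.Set.mem_add]
        unfold SliceAt
        tauto) acc)]
  constructor
  · rintro (hm | ⟨L, hL, s, hs, hsl⟩)
    · exact Or.inl hm
    · rw [PySem.List.mem_pyRange_one] at hL hs
      subst hsl
      exact Or.inr (slice_proper v L s hL.1 hL.2 hs.1)
  · rintro (hm | hp)
    · exact Or.inl hm
    · exact Or.inr (proper_slice w v hp)

-- the whole set holds exactly the proper substrings of some word
lemma mem_subs (w : String) (words : List String) :
    w ∈ words.foldl properSubsInto PySem.Set.empty ↔ ∃ v ∈ words, ProperSub w v := by
  have main : ∀ (l : List String) (acc : PySem.Set String),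
      w ∈ l.foldl properSubsInto acc ↔ w ∈ acc ∨ ∃ v ∈ l, ProperSub w v := by
    intro l
    induction l with
    | nil => simp
    | cons v vs ih =>
      intro acc
      simp only [List.foldl_cons, ih, mem_properSubsInto, List.mem_cons]
      constructor
      · rintro ((hm | hp) | ⟨u, hu, hpu⟩)
        · exact Or.inl hm
        · exact Or.inr ⟨v, Or.inl rfl, hp⟩
        · exact Or.inr ⟨u, Or.inr hu, hpu⟩
      · rintro (hm | ⟨u, (rfl | hu), hpu⟩)
        · exact Or.inl (Or.inl hm)
        · exact Or.inl (Or.inr hpu)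
        · exact Or.inr ⟨u, hu, hpu⟩
  rw [main words PySem.Set.empty]
  simp [PySem.Set.empty]

-- on a length-sorted list, A's outer loop is a filter by the global condition
lemma aOuter_eq_filter (f : String → Bool) :
    ∀ s : List String, s.Pairwise (fun a b => PySem.Str.len a ≤ PySem.Str.len b) →
    (∀ w ∈ s, (f w = true ↔ ∃ v ∈ s, ProperSub w v)) →
    aOuter s = s.filter f := by
  intro s
  induction s with
  | nil => intro _ _; rfl
  | cons wi rest ih =>
    intro hpw hf
    have h1 : ∀ b ∈ rest, PySem.Str.len wi ≤ PySem.Str.len b := (List.pairwise_cons.mp hpw).1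
    have h2 := (List.pairwise_cons.mp hpw).2
    have hfi : f wi = aScan wi (wi :: rest) := by
      rw [Bool.eq_iff_iff, aScan_iff]
      exact hf wi List.mem_cons_self
    have hf' : ∀ w ∈ rest, (f w = true ↔ ∃ v ∈ rest, ProperSub w v) := by
      intro w hw
      rw [hf w (List.mem_cons_of_mem _ hw)]
      constructor
      · rintro ⟨v, hv, hp⟩
        rcases List.mem_cons.mp hv with rfl | hv
        · exfalso
          have hle := h1 w hw
          rw [PySem.Str.len_eq, PySem.Str.len_eq] at hle
          have := hp.2
          omega
        · exact ⟨v, hv, hp⟩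
      · rintro ⟨v, hv, hp⟩
        exact ⟨v, List.mem_cons_of_mem _ hv, hp⟩
    rw [aOuter, List.filter_cons, ← hfi, ih h2 hf']

-- ===== VERDICT (by name: the statement is the Claim_ definition above) =====
theorem stringMatching_spec : Claim_equal_stringMatching := by
  intro words _
  unfold Spec_stringMatching stringMatching stringMatching_alt
  apply aOuter_eq_filter
  · exact PySem.List.sorted_pairwise words (fun x => PySem.Str.len x)
  · intro w _
    rw [PySem.Set.contains_iff, mem_subs]
    constructor
    · rintro ⟨v, hv, hp⟩; exact ⟨v, (PySem.List.mem_sorted _ _ _ _).mpr hv, hp⟩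
    · rintro ⟨v, hv, hp⟩; exact ⟨v, (PySem.List.mem_sorted _ _ _ _).mp hv, hp⟩
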